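-- pv_equiv track=rewrite | github.com/dariomonopoli-dev/uzh-inf-summaries | year3/sem6/phy124/sequential_data/fibonacci_to_conway.py | conway_fib
-- ===== SOURCE A (Python) =====
-- def is_prime(n):
--     if n <= 1:
--         return False
--     if n == 2:
--         return True
--     if n % 2 == 0:
--         return False
--     i = 3
--     while i * i <= n:
--         if n % i == 0:
--             return False
--         i += 2
--     return True
--
-- def lowest_prime_divisor(n):
--     if is_prime(n):
--         return n
--     i = 2
--     while i <= n:  # iterate through all possible divisors from 2 to n
--         if n % i == 0:
--             return i
--         i += 1
--
-- def conway_fib(N):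
--     f = [4, 3]
--     for n in range(2, N + 1):
--         next_num = f[n - 1] + f[n - 2]
--         if is_prime(next_num):
--             f.append(next_num)
--         else:
--             prime_divisor = lowest_prime_divisor(next_num)
--             f.append(next_num // prime_divisor)
--     return f
-- ===== SOURCE B (Python) =====
-- def smallest_factor(n):
--     """Smallest prime factor of n (n itself when n is prime)."""
--     if n % 2 == 0:
--         return 2
--     d = 3
--     while d * d <= n:
--         if n % d == 0:
--             return d
--         d += 2
--     return n
--
-- def conway_fib(N):
--     f = [4, 3]
--     seen = {(4, 3): 0}  # pair of consecutive values -> index of its first occurrence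
--     while len(f) < N + 1:
--         s = f[-2] + f[-1]
--         p = smallest_factor(s)
--         f.append(s if p == s else s // p)
--         j = len(f) - 2
--         pair = (f[j], f[j + 1])
--         if pair in seen:
--             # the recurrence depends only on the last pair, so from here on the
--             # sequence repeats with this period: copy instead of factoring
--             period = j - seen[pair]
--             while len(f) < N + 1:
--                 f.append(f[len(f) - period])
--             break
--         seen[pair] = j
--     return f
-- ===== Notes on version B (the rewrite author's own statement) =====
-- stated objective: faster
-- what changed: B adds cycle detection with a hash map of consecutive-value pairs: since each new element depends only on the previous two, once a pair of consecutive values recurs the sequence is periodic, and B fills the rest of the list by copying f[len(f)-period] instead of running the primality test / divisor search; A's two helpers are also merged into one smallest-prime-factor trial division.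
import Mathlib
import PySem

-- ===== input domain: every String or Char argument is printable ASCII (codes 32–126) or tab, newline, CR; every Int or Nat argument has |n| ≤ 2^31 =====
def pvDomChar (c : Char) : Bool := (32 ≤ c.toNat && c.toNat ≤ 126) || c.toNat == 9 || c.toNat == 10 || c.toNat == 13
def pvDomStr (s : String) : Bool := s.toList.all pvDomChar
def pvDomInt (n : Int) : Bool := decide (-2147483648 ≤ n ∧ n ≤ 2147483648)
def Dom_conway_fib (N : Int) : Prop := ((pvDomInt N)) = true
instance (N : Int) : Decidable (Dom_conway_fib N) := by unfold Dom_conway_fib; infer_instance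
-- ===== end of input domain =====

-- B adds cycle detection: each element depends only on the previous pair, so once a
-- pair of consecutive values recurs (tracked in a dict) the sequence is periodic and
-- the rest is filled by copying f[len(f)-period] with no further factoring; the two
-- helpers are also merged into one smallest-prime-factor trial division. Objective:
-- faster (measured; after the cycle is found each element costs one list lookup).


-- ===== PORT A =====
-- while i * i <= n: … i += 2   (trial division by odd i)
def isPrimeLoop (n i : Int) : Bool :=
  if i * i ≤ n then
    if PySem.Int.mod n i == 0 then false
    else isPrimeLoop n (i + 2)
  else true
termination_by (n + 3 - i).toNat
decreasing_by
  have hii : i ≤ i * i := by nlinarith [mul_self_nonneg i, mul_self_nonneg (i - 1)]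
  omega

def is_prime (n : Int) : Bool :=
  if n ≤ 1 then false
  else if n == 2 then true
  else if PySem.Int.mod n 2 == 0 then false
  else isPrimeLoop n 3

-- while i <= n: …; falling through the loop is Python's implicit 'return None' → none
def lpdLoop (n i : Int) : Option Int :=
  if i ≤ n then
    if PySem.Int.mod n i == 0 then some i
    else lpdLoop n (i + 1)
  else none
termination_by (n + 1 - i).toNat

def lowest_prime_divisor (n : Int) : Option Int :=
  if is_prime n then some n else lpdLoop n 2

-- body of A's for-loop; f[n-1], f[n-2] are always in range here (len f = n), so pyGetD
-- is exact; the none branch is Python's TypeError on None, unreachable since next ≥ 4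
def conway_step (f : List Int) (n : Int) : List Int :=
  let next := PySem.List.pyGetD f (n - 1) 0 + PySem.List.pyGetD f (n - 2) 0
  if is_prime next then f ++ [next]
  else
    match lowest_prime_divisor next with
    | some p => f ++ [PySem.Int.floordiv next p]
    | none => f ++ [0]

def conway_fib (N : Int) : List Int :=
  (PySem.List.pyRange 2 (N + 1) 1).foldl conway_step [4, 3]

-- ===== PORT B =====
-- while d * d <= n: … d += 2; return n   (smallest prime factor, n itself if prime)
def sfLoop (n d : Int) : Int :=
  if d * d ≤ n then
    if PySem.Int.mod n d == 0 then d
    else sfLoop n (d + 2)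
  else n
termination_by (n + 3 - d).toNat
decreasing_by
  have hdd : d ≤ d * d := by nlinarith [mul_self_nonneg d, mul_self_nonneg (d - 1)]
  omega

def smallest_factor (n : Int) : Int :=
  if PySem.Int.mod n 2 == 0 then 2 else sfLoop n 3

-- B's inner copy loop: while len(f) < N+1: f.append(f[len(f)-period]); the index is
-- always in range here (1 ≤ period ≤ len(f)), so pyGetD is exact
def copyLoop (N period : Int) (f : List Int) : List Int :=
  if (f.length : Int) < N + 1 then
    copyLoop N period (f ++ [PySem.List.pyGetD f ((f.length : Int) - period) 0])
  else f
termination_by (N + 1 - f.length).toNat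
decreasing_by simp; omega

-- B's main loop: while len(f) < N+1: append the reduced sum, then look the new last
-- pair up in 'seen'; on a hit switch to copyLoop, otherwise record the pair
def mainLoop (N : Int) (f : List Int) (seen : PySem.Dict (Int × Int) Int) : List Int :=
  if (f.length : Int) < N + 1 then
    let s := PySem.List.pyGetD f (-2) 0 + PySem.List.pyGetD f (-1) 0
    let p := smallest_factor s
    let f' := f ++ [if p == s then s else PySem.Int.floordiv s p]
    let j : Int := (f'.length : Int) - 2
    let pair := (PySem.List.pyGetD f' j 0, PySem.List.pyGetD f' (j + 1) 0)
    match seen.get? pair with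
    | some i => copyLoop N (j - i) f'
    | none => mainLoop N f' (seen.insert pair j)
  else f
termination_by (N + 1 - f.length).toNat
decreasing_by simp; omega

def conway_fib_alt (N : Int) : List Int :=
  mainLoop N [4, 3] (PySem.Dict.ofList [((4, 3), 0)])

-- ===== PRECONDITION & SPEC =====
def Spec_conway_fib (N : Int) (out : List Int) : Prop := out = conway_fib_alt N
instance (N : Int) (out : List Int) : Decidable (Spec_conway_fib N out) := by unfold Spec_conway_fib; infer_instance

-- ===== CLAIM (what is proved, stated in full; the proofs are below) =====
def Claim_equal_conway_fib : Prop := ∀ (N : Int), Dom_conway_fib N → Spec_conway_fib N (conway_fib N)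

-- ===== LEMMAS AND PROOFS =====

-- '% == 0' is divisibility
theorem pv_mod_beq (a b : Int) : (PySem.Int.mod a b == 0) = decide (b ∣ a) := by
  rcases em (b ∣ a) with h | h
  · simp [h, (PySem.Int.mod_eq_zero_iff_dvd a b).2 h]
  · simp only [h, decide_false]
    have := (PySem.Int.mod_eq_zero_iff_dvd a b).not.2 h
    simpa using this

theorem pv_floordiv_nat (a b : Int) (h : 0 ≤ a) (h2 : 0 < b) :
    PySem.Int.floordiv a b = ((a.toNat / b.toNat : ℕ) : Int) := by
  have ha : a = ((a.toNat : ℕ) : Int) := by omega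
  have hb : b = ((b.toNat : ℕ) : Int) := by omega
  rw [ha, hb, PySem.Int.floordiv_natCast]; simp

theorem pv_dvd_toNat {n j : Int} (h : j ∣ n) (hn : 0 ≤ n) (hj : 0 ≤ j) :
    j.toNat ∣ n.toNat := by
  have h' := Int.natAbs_dvd_natAbs.2 h
  have e1 : j.natAbs = j.toNat := by omega
  have e2 : n.natAbs = n.toNat := by omega
  rwa [e1, e2] at h'

theorem pv_dvd_of_toNat {n j : Int} (h : j.toNat ∣ n.toNat) (hn : 0 ≤ n) (hj : 0 ≤ j) :
    j ∣ n := by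
  have e1 : j.natAbs = j.toNat := by omega
  have e2 : n.natAbs = n.toNat := by omega
  rw [← e1, ← e2] at h
  exact Int.natAbs_dvd_natAbs.1 h

theorem pv_not_prime_of_dvd {n i : Int} (hn : 1 < n) (hi : 3 ≤ i) (hii : i * i ≤ n)
    (hdvd : i ∣ n) : ¬ Nat.Prime n.toNat := by
  intro hp
  have hilt : i < n := by nlinarith
  have : i.toNat ∣ n.toNat := pv_dvd_toNat hdvd (by omega) (by omega)
  rcases (Nat.Prime.eq_one_or_self_of_dvd hp _ this) with h | h <;> omega

theorem pv_prime_of_no_dvd {n i : Int} (hn : 1 < n) (hi : 2 ≤ i) (hii : n < i * i)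
    (hprev : ∀ j : Int, 2 ≤ j → j < i → ¬ j ∣ n) : Nat.Prime n.toNat := by
  by_contra hnp
  have hpf := Nat.minFac_prime (show n.toNat ≠ 1 by omega)
  have hsq : n.toNat.minFac * n.toNat.minFac ≤ n.toNat := by
    have := Nat.minFac_sq_le_self (by omega) hnp; nlinarith [this]
  have hsq' : ((n.toNat.minFac : ℕ) : Int) * ((n.toNat.minFac : ℕ) : Int) ≤ n := by
    zify at hsq; omega
  have hdvd : ((n.toNat.minFac : ℕ) : Int) ∣ n :=
    pv_dvd_of_toNat (by simpa using Nat.minFac_dvd n.toNat) (by omega) (by positivity)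
  have h2 : (2 : Int) ≤ ((n.toNat.minFac : ℕ) : Int) := by exact_mod_cast hpf.two_le
  have hlt : ((n.toNat.minFac : ℕ) : Int) < i := by
    by_contra hge
    push Not at hge
    have : i * i ≤ ((n.toNat.minFac : ℕ) : Int) * ((n.toNat.minFac : ℕ) : Int) :=
      mul_le_mul hge hge (by omega) (by omega)
    linarith
  exact hprev _ h2 hlt hdvd

theorem pv_hprev_step {n i : Int} (hi : 3 ≤ i) (hiodd : i % 2 = 1)
    (hprev : ∀ j : Int, 2 ≤ j → j < i → ¬ j ∣ n) (hd : ¬ i ∣ n) :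
    ∀ j : Int, 2 ≤ j → j < i + 2 → ¬ j ∣ n := by
  intro j hj2 hjlt hjd
  rcases em (j < i) with hlt | hlt
  · exact hprev j hj2 hlt hjd
  · rcases em (j = i) with rfl | hne
    · exact hd hjd
    · have h2j : (2 : Int) ∣ j := by omega
      exact hprev 2 (by omega) (by omega) (h2j.trans hjd)

theorem isPrimeLoop_eq (n : Int) (hn : 1 < n) (i : Int) (hi : 3 ≤ i) (hiodd : i % 2 = 1)
    (hprev : ∀ j : Int, 2 ≤ j → j < i → ¬ j ∣ n) :
    isPrimeLoop n i = decide (Nat.Prime n.toNat) := by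
  rw [isPrimeLoop, pv_mod_beq n i]
  rcases em (i * i ≤ n) with h1 | h1
  · rw [if_pos h1]
    rcases em (i ∣ n) with hd | hd
    · rw [if_pos (by simp [hd])]
      simp [pv_not_prime_of_dvd hn hi h1 hd]
    · rw [if_neg (by simp [hd])]
      exact isPrimeLoop_eq n hn (i + 2) (by omega) (by omega) (pv_hprev_step hi hiodd hprev hd)
  · rw [if_neg h1]
    simp [pv_prime_of_no_dvd hn (by omega) (by omega) hprev]
termination_by (n + 3 - i).toNat
decreasing_by
  have hii : i ≤ i * i := by nlinarith [mul_self_nonneg i, mul_self_nonneg (i - 1)]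
  omega

theorem is_prime_eq (n : Int) (hn : 2 ≤ n) : is_prime n = decide (Nat.Prime n.toNat) := by
  rw [is_prime, if_neg (show ¬ n ≤ 1 by omega)]
  rcases eq_or_ne n 2 with rfl | hne
  · rw [if_pos (by simp)]; decide
  · rw [if_neg (by simp [hne]), pv_mod_beq n 2]
    rcases em ((2 : Int) ∣ n) with h2 | h2
    · rw [if_pos (by simp [h2])]
      have hnp : ¬ Nat.Prime n.toNat := by
        intro hp
        have : (2 : Int).toNat ∣ n.toNat := pv_dvd_toNat h2 (by omega) (by omega)
        rcases (Nat.Prime.eq_one_or_self_of_dvd hp _ this) with h | h <;> omega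
      simp [hnp]
    · rw [if_neg (by simp [h2])]
      refine isPrimeLoop_eq n (by omega) 3 le_rfl (by decide) ?_
      intro j hj2 hjlt hjd
      have : j = 2 := by omega
      subst this; exact h2 hjd

theorem sfLoop_eq (n : Int) (hn : 1 < n) (i : Int) (hi : 3 ≤ i) (hiodd : i % 2 = 1)
    (hprev : ∀ j : Int, 2 ≤ j → j < i → ¬ j ∣ n) :
    sfLoop n i = if Nat.Prime n.toNat then n else ((n.toNat.minFac : ℕ) : Int) := by
  rw [sfLoop, pv_mod_beq n i]
  rcases em (i * i ≤ n) with h1 | h1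
  · rw [if_pos h1]
    rcases em (i ∣ n) with hd | hd
    · rw [if_pos (by simp [hd])]
      have hnp := pv_not_prime_of_dvd hn hi h1 hd
      rw [if_neg hnp]
      have hidvd : i.toNat ∣ n.toNat := pv_dvd_toNat hd (by omega) (by omega)
      have hle : n.toNat.minFac ≤ i.toNat := Nat.minFac_le_of_dvd (by omega) hidvd
      have hpf := Nat.minFac_prime (show n.toNat ≠ 1 by omega)
      have hge : ¬ ((n.toNat.minFac : ℕ) : Int) < i := by
        intro hlt
        exact hprev _ (by exact_mod_cast hpf.two_le) hlt
          (pv_dvd_of_toNat (by simpa using Nat.minFac_dvd n.toNat) (by omega) (by positivity))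
      omega
    · rw [if_neg (by simp [hd])]
      exact sfLoop_eq n hn (i + 2) (by omega) (by omega) (pv_hprev_step hi hiodd hprev hd)
  · rw [if_neg h1, if_pos (pv_prime_of_no_dvd hn (by omega) (by omega) hprev)]
termination_by (n + 3 - i).toNat
decreasing_by
  have hii : i ≤ i * i := by nlinarith [mul_self_nonneg i, mul_self_nonneg (i - 1)]
  omega

theorem smallest_factor_eq (n : Int) (hn : 2 ≤ n) :
    smallest_factor n = ((n.toNat.minFac : ℕ) : Int) := by
  rw [smallest_factor, pv_mod_beq n 2]
  have hpf := Nat.minFac_prime (show n.toNat ≠ 1 by omega)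
  rcases em ((2 : Int) ∣ n) with h2 | h2
  · rw [if_pos (by simp [h2])]
    have : (2 : Int).toNat ∣ n.toNat := pv_dvd_toNat h2 (by omega) (by omega)
    have hle : n.toNat.minFac ≤ 2 := Nat.minFac_le_of_dvd (by omega) this
    have := hpf.two_le
    omega
  · rw [if_neg (by simp [h2])]
    rw [sfLoop_eq n (by omega) 3 le_rfl (by decide) ?_]
    · split_ifs with hp
      · rw [Nat.Prime.minFac_eq hp]; omega
      · rfl
    · intro j hj2 hjlt hjd
      have : j = 2 := by omega
      subst this; exact h2 hjd

theorem lpdLoop_eq (n : Int) (hn : 2 ≤ n) (i : Int) (hi : 2 ≤ i)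
    (hile : i ≤ ((n.toNat.minFac : ℕ) : Int)) :
    lpdLoop n i = some ((n.toNat.minFac : ℕ) : Int) := by
  have hfle : n.toNat.minFac ≤ n.toNat := Nat.minFac_le (by omega)
  have hfdvd : ((n.toNat.minFac : ℕ) : Int) ∣ n :=
    pv_dvd_of_toNat (by simpa using Nat.minFac_dvd n.toNat) (by omega) (by positivity)
  rw [lpdLoop, if_pos (by omega), pv_mod_beq n i]
  rcases em (i ∣ n) with hd | hd
  · have hidvd : i.toNat ∣ n.toNat := pv_dvd_toNat hd (by omega) (by omega)
    have hle : n.toNat.minFac ≤ i.toNat := Nat.minFac_le_of_dvd (by omega) hidvd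
    rw [if_pos (by simp [hd])]
    congr 1; omega
  · rw [if_neg (by simp [hd])]
    refine lpdLoop_eq n hn (i + 1) (by omega) ?_
    have : i ≠ ((n.toNat.minFac : ℕ) : Int) := by
      rintro rfl; exact hd hfdvd
    omega
termination_by (n + 1 - i).toNat

-- the value both programs append when the newly formed sum is s
def nextVal (s : Int) : Int :=
  if Nat.Prime s.toNat then s else PySem.Int.floordiv s ((s.toNat.minFac : ℕ) : Int)

theorem nextVal_ge_two (s : Int) (hs : 2 ≤ s) : 2 ≤ nextVal s := by
  rw [nextVal]
  split_ifs with hp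
  · omega
  · have hpf := Nat.minFac_prime (show s.toNat ≠ 1 by omega)
    have h2 := hpf.two_le
    have hsq : s.toNat.minFac * s.toNat.minFac ≤ s.toNat := by
      have := Nat.minFac_sq_le_self (by omega) hp; nlinarith [this]
    rw [pv_floordiv_nat s _ (by omega) (by positivity)]
    have hpos : 0 < s.toNat.minFac := by omega
    have hsub : s.toNat.minFac ≤ s.toNat / (((s.toNat.minFac : ℕ) : Int)).toNat := by
      simp only [Int.toNat_natCast]
      exact (Nat.le_div_iff_mul_le hpos).2 hsq
    omega

-- the reference sequence both programs compute
def seq : ℕ → Int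
  | 0 => 4
  | 1 => 3
  | (n + 2) => nextVal (seq n + seq (n + 1))

def F (L : ℕ) : List Int := (List.range L).map seq

theorem seq_ge_two : ∀ n, 2 ≤ seq n
  | 0 => by decide
  | 1 => by decide
  | (n + 2) => nextVal_ge_two _ (by have := seq_ge_two n; have := seq_ge_two (n + 1); omega)

theorem F_length (L : ℕ) : (F L).length = L := by simp [F]

theorem F_succ (L : ℕ) : F (L + 1) = F L ++ [seq L] := by
  simp [F, List.range_succ]

theorem F_getD (L k : ℕ) (h : k < L) : PySem.List.pyGetD (F L) (k : Int) 0 = seq k := by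
  rw [PySem.List.pyGetD_natCast]
  rw [List.getD_eq_getElem _ 0 (by simp [F]; omega)]
  simp [F]

-- A's loop body appends nextVal of the last two entries
theorem conway_step_val (f : List Int) (n : Int)
    (hs : 2 ≤ PySem.List.pyGetD f (n - 1) 0 + PySem.List.pyGetD f (n - 2) 0) :
    conway_step f n = f ++ [nextVal (PySem.List.pyGetD f (n - 1) 0 + PySem.List.pyGetD f (n - 2) 0)] := by
  simp only [conway_step]
  set s := PySem.List.pyGetD f (n - 1) 0 + PySem.List.pyGetD f (n - 2) 0 with hs'
  rw [is_prime_eq s hs]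
  rcases em (Nat.Prime s.toNat) with hp | hp
  · rw [if_pos (by simp [hp]), nextVal, if_pos hp]
  · rw [if_neg (by simp [hp]), nextVal, if_neg hp]
    have hpf := Nat.minFac_prime (show s.toNat ≠ 1 by omega)
    have hlpd : lowest_prime_divisor s = some ((s.toNat.minFac : ℕ) : Int) := by
      rw [lowest_prime_divisor, is_prime_eq s hs, if_neg (by simp [hp])]
      exact lpdLoop_eq s hs 2 le_rfl (by exact_mod_cast hpf.two_le)
    rw [hlpd]

-- B's reduced value is nextVal too
theorem b_val (s : Int) (hs : 2 ≤ s) :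
    (if smallest_factor s == s then s else PySem.Int.floordiv s (smallest_factor s)) = nextVal s := by
  rw [smallest_factor_eq s hs]
  have hpf := Nat.minFac_prime (show s.toNat ≠ 1 by omega)
  have hfle : s.toNat.minFac ≤ s.toNat := Nat.minFac_le (by omega)
  rcases em (Nat.Prime s.toNat) with hp | hp
  · have heq : ((s.toNat.minFac : ℕ) : Int) = s := by
      rw [Nat.Prime.minFac_eq hp]; omega
    rw [heq, if_pos (by simp), nextVal, if_pos hp]
  · have hne : ((s.toNat.minFac : ℕ) : Int) ≠ s := by
      intro h
      exact hp (by have := hpf; rwa [show s.toNat.minFac = s.toNat by omega] at this)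
    rw [if_neg (by simp [hne]), nextVal, if_neg hp]

-- A's fold computes F
theorem A_fold (j : ℕ) :
    (PySem.List.pyRange 2 (2 + (j : Int)) 1).foldl conway_step [4, 3] = F (j + 2) := by
  induction j with
  | zero =>
    rw [PySem.List.pyRange_one_eq_nil (by omega)]
    rfl
  | succ j ih =>
    have hra : PySem.List.pyRange 2 (2 + ((j : Int) + 1)) 1
        = PySem.List.pyRange 2 (2 + (j : Int)) 1 ++ [2 + (j : Int)] := by
      have := PySem.List.pyRange_one_succ_right (a := 2) (b := 2 + (j : Int)) (by omega)
      rw [← this]; ring_nf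
    have hidx1 : PySem.List.pyGetD (F (j + 2)) (2 + (j : Int) - 1) 0 = seq (j + 1) := by
      have he : (2 + (j : Int) - 1) = ((j + 1 : ℕ) : Int) := by omega
      rw [he, F_getD _ _ (by omega)]
    have hidx2 : PySem.List.pyGetD (F (j + 2)) (2 + (j : Int) - 2) 0 = seq j := by
      have he : (2 + (j : Int) - 2) = ((j : ℕ) : Int) := by omega
      rw [he, F_getD _ _ (by omega)]
    push_cast
    rw [hra, List.foldl_append, ih, List.foldl_cons, List.foldl_nil,
      conway_step_val _ _ (by rw [hidx1, hidx2]; have := seq_ge_two j; have := seq_ge_two (j+1); omega),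
      hidx1, hidx2]
    have : nextVal (seq (j + 1) + seq j) = seq (j + 2) := by
      rw [seq, add_comm]
    rw [this, ← F_succ]

-- once a pair of consecutive values recurs, seq is periodic from there on
theorem seq_periodic (k p : ℕ) (h1 : seq (k + p) = seq k) (h2 : seq (k + 1 + p) = seq (k + 1)) :
    ∀ m, k ≤ m → seq (m + p) = seq m := by
  intro m
  induction m using Nat.strong_induction_on with
  | _ m ih =>
    intro hkm
    rcases em (m = k) with rfl | hk
    · exact h1
    rcases em (m = k + 1) with rfl | hk1
    · exact h2
    have hm2 : k + 2 ≤ m := by omega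
    obtain ⟨n, rfl⟩ : ∃ n, m = n + 2 := ⟨m - 2, by omega⟩
    have e1 := ih n (by omega) (by omega)
    have e2 := ih (n + 1) (by omega) (by omega)
    have : n + 2 + p = (n + p) + 2 := by omega
    rw [this, seq, show n + p + 1 = n + 1 + p by omega, e1, e2, ← seq]

theorem copyLoop_eq (N : Int) (k p : ℕ) (hp : 0 < p)
    (h1 : seq (k + p) = seq k) (h2 : seq (k + 1 + p) = seq (k + 1))
    (L : ℕ) (hL : k + p + 2 ≤ L) :
    copyLoop N (p : Int) (F L) = F (max (N + 1).toNat L) := by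
  rw [copyLoop, F_length]
  rcases em ((L : Int) < N + 1) with h | h
  · rw [if_pos h]
    have he : (L : Int) - (p : Int) = ((L - p : ℕ) : Int) := by omega
    rw [he, F_getD _ _ (by omega)]
    have hcp : seq (L - p) = seq L := by
      have := seq_periodic k p h1 h2 (L - p) (by omega)
      rw [show L - p + p = L by omega] at this
      omega
    rw [hcp, ← F_succ, copyLoop_eq N k p hp h1 h2 (L + 1) (by omega)]
    congr 1; omega
  · rw [if_neg h]
    congr 1; omega
termination_by (N + 1 - L).toNat
decreasing_by omega

theorem mainLoop_eq (N : Int) (L : ℕ) (hL : 2 ≤ L) (seen : PySem.Dict (Int × Int) Int)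
    (hinv : ∀ q i, seen.get? q = some i →
      ∃ k : ℕ, i = (k : Int) ∧ k + 2 ≤ L ∧ q = (seq k, seq (k + 1))) :
    mainLoop N (F L) seen = F (max (N + 1).toNat L) := by
  rw [mainLoop, F_length]
  rcases em ((L : Int) < N + 1) with h | h
  · rw [if_pos h]
    have hlen : 2 ≤ (F L).length := by rw [F_length]; exact hL
    have hidx2 : PySem.List.pyGetD (F L) (-2) 0 = seq (L - 2) := by
      rw [PySem.List.pyGetD_neg_ofNat (F L) 2 0 (by omega) hlen]
      simp [F]
    have hidx1 : PySem.List.pyGetD (F L) (-1) 0 = seq (L - 1) := by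
      rw [PySem.List.pyGetD_neg_ofNat (F L) 1 0 (by omega) (by omega)]
      simp [F]
    have hs2 : 2 ≤ seq (L - 2) + seq (L - 1) := by
      have := seq_ge_two (L - 2); have := seq_ge_two (L - 1); omega
    have hseqL : nextVal (seq (L - 2) + seq (L - 1)) = seq L := by
      conv_rhs => rw [show L = (L - 2) + 2 by omega, seq]
      rw [show L - 2 + 1 = L - 1 by omega]
    have hfs : F L ++ [seq L] = F (L + 1) := (F_succ L).symm
    simp only [hidx2, hidx1, b_val _ hs2, hseqL, hfs, F_length]
    have hj : ((L + 1 : ℕ) : Int) - 2 = ((L - 1 : ℕ) : Int) := by omega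
    have hj1 : ((L + 1 : ℕ) : Int) - 2 + 1 = ((L : ℕ) : Int) := by omega
    have hpair1 : PySem.List.pyGetD (F (L + 1)) (((L + 1 : ℕ) : Int) - 2) 0 = seq (L - 1) := by
      rw [hj, F_getD _ _ (by omega)]
    have hpair2 : PySem.List.pyGetD (F (L + 1)) (((L + 1 : ℕ) : Int) - 2 + 1) 0 = seq L := by
      rw [hj1, F_getD _ _ (by omega)]
    rw [hpair1, hpair2]
    rcases hg : seen.get? (seq (L - 1), seq L) with _ | i
    · -- not seen: record the pair and continue
      show mainLoop N (F (L + 1))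
        (seen.insert (seq (L - 1), seq L) (((L + 1 : ℕ) : Int) - 2)) = F (max (N + 1).toNat L)
      have hinv' : ∀ q i,
          (seen.insert (seq (L - 1), seq L) (((L + 1 : ℕ) : Int) - 2)).get? q = some i →
          ∃ k : ℕ, i = (k : Int) ∧ k + 2 ≤ L + 1 ∧ q = (seq k, seq (k + 1)) := by
        intro q i hq
        rw [PySem.Dict.get?_insert] at hq
        split_ifs at hq with hqe
        · have hi : (((L + 1 : ℕ) : Int) - 2) = i := Option.some.inj hq
          refine ⟨L - 1, by omega, by omega, ?_⟩
          rw [hqe]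
          congr 1
          rw [show L - 1 + 1 = L by omega]
        · obtain ⟨k, hk1, hk2, hk3⟩ := hinv q i hq
          exact ⟨k, hk1, by omega, hk3⟩
      rw [mainLoop_eq N (L + 1) (by omega) _ hinv']
      congr 1; omega
    · -- seen before: the sequence is periodic from k on with period L - 1 - k
      obtain ⟨k, rfl, hk2, hk3⟩ := hinv _ i hg
      show copyLoop N (((L + 1 : ℕ) : Int) - 2 - (k : Int)) (F (L + 1)) = F (max (N + 1).toNat L)
      have hpe1 : seq k = seq (L - 1) := (congrArg Prod.fst hk3).symm
      have hpe2 : seq (k + 1) = seq L := (congrArg Prod.snd hk3).symm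
      have hpdef : ((L + 1 : ℕ) : Int) - 2 - (k : Int) = ((L - 1 - k : ℕ) : Int) := by omega
      have hc1 : seq (k + (L - 1 - k)) = seq k := by
        rw [show k + (L - 1 - k) = L - 1 by omega]; omega
      have hc2 : seq (k + 1 + (L - 1 - k)) = seq (k + 1) := by
        rw [show k + 1 + (L - 1 - k) = L by omega]; omega
      rw [hpdef, copyLoop_eq N k (L - 1 - k) (by omega) hc1 hc2 (L + 1) (by omega)]
      congr 1; omega
  · rw [if_neg h]
    congr 1; omega
termination_by (N + 1 - L).toNat
decreasing_by omega

theorem B_eq (N : Int) : conway_fib_alt N = F (max (N + 1).toNat 2) := by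
  rw [conway_fib_alt]
  have h2 : F 2 = [4, 3] := by decide
  rw [← h2]
  refine mainLoop_eq N 2 le_rfl _ ?_
  intro q i hq
  have hd : PySem.Dict.ofList [(((4 : Int), (3 : Int)), (0 : Int))]
      = PySem.Dict.mk [((4, 3), 0)] := by decide
  rw [hd, PySem.Dict.get?_mk_cons] at hq
  split_ifs at hq with he
  · refine ⟨0, by simpa using hq.symm, by omega, ?_⟩
    have : ((4 : Int), (3 : Int)) = q := by simpa using he
    rw [← this]
    decide
  · simp [PySem.Dict.get?] at hq

theorem A_eq (N : Int) : conway_fib N = F (max (N + 1).toNat 2) := by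
  rw [conway_fib]
  rcases em (N ≤ 1) with h | h
  · rw [PySem.List.pyRange_one_eq_nil (by omega)]
    have : max (N + 1).toNat 2 = 2 := by omega
    rw [this]; decide
  · have := A_fold (N - 1).toNat
    rw [show (2 : Int) + (((N - 1).toNat : ℕ) : Int) = N + 1 by omega] at this
    rw [this]
    congr 1; omega

-- ===== VERDICT (by name: the statement is the Claim_ definition above) =====
theorem conway_fib_spec : Claim_equal_conway_fib := by
  intro N _
  unfold Spec_conway_fib
  rw [A_eq, B_eq]
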